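-- pv_equiv track=rewrite | github.com/jamesquinlan/discrete-math-labs | solutions/python/Lab-12.py | dict_to_matrix
-- ===== SOURCE A (Python) =====
-- def dict_to_matrix(G):
--     """Convert graph dictionary to adjacency matrix"""
--     vertices = sorted(G.keys())
--     n = len(vertices)
--     idx = {v: i for i, v in enumerate(vertices)}
--
--     A = [[0]*n for _ in range(n)]
--     for v in G:
--         for u in G[v]:
--             A[idx[v]][idx[u]] = 1
--     return A
-- ===== SOURCE B (Python) =====
-- def dict_to_matrix(G):
--     """Convert graph dictionary to adjacency matrix"""
--     vertices = sorted(G)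
--     index = {v: i for i, v in enumerate(vertices)}
--
--     def row(v):
--         hits = {index[u] for u in G[v]}
--         return [1 if j in hits else 0 for j in range(len(vertices))]
--
--     return [row(v) for v in vertices]
-- ===== Notes on version B (the rewrite author's own statement) =====
-- stated objective: alternative
-- what changed: B keeps the sorted-vertex index dict but drops A's preallocated n x n zero matrix and edge-by-edge in-place fill: each row is generated directly as a dense comprehension testing every column index against that row's set of neighbor indices.
import Mathlib
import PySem

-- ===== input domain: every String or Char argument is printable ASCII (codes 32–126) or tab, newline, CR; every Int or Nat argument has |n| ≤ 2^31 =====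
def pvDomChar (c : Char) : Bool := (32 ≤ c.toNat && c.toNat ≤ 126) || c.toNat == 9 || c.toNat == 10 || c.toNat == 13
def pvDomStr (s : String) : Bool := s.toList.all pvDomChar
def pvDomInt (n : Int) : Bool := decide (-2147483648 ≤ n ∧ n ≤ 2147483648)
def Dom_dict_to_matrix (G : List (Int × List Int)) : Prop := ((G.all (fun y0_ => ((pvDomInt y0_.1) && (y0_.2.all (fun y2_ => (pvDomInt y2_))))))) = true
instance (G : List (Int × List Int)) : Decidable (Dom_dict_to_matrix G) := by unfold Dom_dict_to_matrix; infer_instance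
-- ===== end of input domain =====

-- B replaces A's index-dict + preallocated zero matrix scatter-filled edge by edge with a dense
-- row-by-row build testing neighbor-set membership per cell (alternative decomposition, same cost).


-- ===== PORT A =====
-- idx = {v: i for i, v in enumerate(vertices)}
def pvIdx (vertices : List Int) : PySem.Dict Int Int :=
  (PySem.List.enumerate vertices).foldl (fun d iv => d.insert iv.2 iv.1) ⟨[]⟩

-- A[idx[v]][idx[u]] = 1 ; a `none` lookup is Python's KeyError, excluded by Pre_
def pvFillCell (idx : PySem.Dict Int Int) (A : List (List Int)) (v u : Int) : List (List Int) :=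
  match idx.get? v, idx.get? u with
  | some i, some j => A.modify i.toNat (fun r => r.set j.toNat 1)
  | _, _ => A

-- for u in G[v]: …
def pvFillRow (idx : PySem.Dict Int Int) (A : List (List Int)) (v : Int) (ns : List Int) :
    List (List Int) :=
  ns.foldl (fun A u => pvFillCell idx A v u) A

def dict_to_matrix (G : List (Int × List Int)) : List (List Int) :=
  let vertices := PySem.List.sorted (G.map Prod.fst) id
  let n := vertices.length
  let idx := pvIdx vertices
  let A := (List.range n).map (fun _ => List.replicate n 0)
  -- for v in G: for u in G[v]: …  (G[v] is the entry's own value: dict keys are distinct, see Pre_)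
  G.foldl (fun A p => pvFillRow idx A p.1 p.2) A

-- ===== PORT B =====
-- def row(v): hits = {index[u] for u in G[v]}; return [1 if j in hits else 0 for j in range(len(vertices))]
def pvRowB (index : PySem.Dict Int Int) (vertices : List Int) (G : List (Int × List Int))
    (v : Int) : List Int :=
  -- index[u] on a missing key raises KeyError in Python (excluded by Pre_); filterMap skips it
  let hits := PySem.Set.ofList ((PySem.Dict.getD ⟨G⟩ v []).filterMap (fun u => index.get? u))
  (PySem.List.pyRange 0 (vertices.length : Int) 1).map (fun j => if j ∈ hits then (1 : Int) else 0)

def dict_to_matrix_alt (G : List (Int × List Int)) : List (List Int) :=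
  let vertices := PySem.List.sorted (G.map Prod.fst) id
  let index := pvIdx vertices
  vertices.map (fun v => pvRowB index vertices G v)

-- ===== PRECONDITION & SPEC =====
-- The input stands for a Python dict, so its keys are distinct; A raises KeyError (returns nothing)
-- when a neighbor is not a key, so those inputs are excluded too.
def Pre_dict_to_matrix (G : List (Int × List Int)) : Prop :=
  (G.map Prod.fst).Nodup ∧ ∀ p ∈ G, ∀ u ∈ p.2, u ∈ G.map Prod.fst
instance (G : List (Int × List Int)) : Decidable (Pre_dict_to_matrix G) := by
  unfold Pre_dict_to_matrix; infer_instance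

def pvWitness_dict_to_matrix : (List (Int × List Int)) := [(2, [1]), (1, [1, 2])]

def Spec_dict_to_matrix (G : List (Int × List Int)) (out : List (List Int)) : Prop :=
  out = dict_to_matrix_alt G
instance (G : List (Int × List Int)) (out : List (List Int)) : Decidable (Spec_dict_to_matrix G out) := by
  unfold Spec_dict_to_matrix; infer_instance

-- ===== CLAIM (what is proved, stated in full; the proofs are below) =====
def Claim_equal_dict_to_matrix : Prop := ∀ (G : List (Int × List Int)), Dom_dict_to_matrix G → Pre_dict_to_matrix G → Spec_dict_to_matrix G (dict_to_matrix G)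

-- ===== LEMMAS AND PROOFS =====

lemma pvIdx_get (vs : List Int) (h : vs.Nodup) : ∀ (d : PySem.Dict Int Int) (start : Int) (v : Int),
    ((PySem.List.enumerate vs start).foldl (fun d iv => d.insert iv.2 iv.1) d).get? v
      = if v ∈ vs then some (start + (vs.idxOf v : Int)) else d.get? v := by
  induction vs with
  | nil => intro d start v; simp [PySem.List.enumerate]
  | cons x t ih =>
    intro d start v
    rw [show PySem.List.enumerate (x :: t) start = (start, x) :: PySem.List.enumerate t (start+1) from rfl]
    rw [List.foldl_cons]
    rw [ih h.of_cons (d.insert x start) (start+1) v]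
    by_cases hvt : v ∈ t
    · have hvx : v ≠ x := fun e => ((List.nodup_cons.mp h).1 (e ▸ hvt)).elim
      have hbe : (x == v) = false := by simp; exact fun e => hvx e.symm
      simp [hvt, List.mem_cons, hvx, List.idxOf_cons, hbe]
      ring
    · by_cases hvx : v = x
      · subst hvx
        simp [hvt, PySem.Dict.get?_insert_self]
      · simp [hvt, hvx, PySem.Dict.get?_insert_of_ne d start hvx]

lemma pvAssoc_getD (G : List (Int × List Int)) (h : (G.map Prod.fst).Nodup) :
    ∀ p ∈ G, PySem.Dict.getD ⟨G⟩ p.1 [] = p.2 := by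
  induction G with
  | nil => simp
  | cons q t ih =>
    intro p hp
    rcases List.mem_cons.mp hp with hp | hp
    · subst hp
      simp [PySem.Dict.getD, PySem.Dict.get?, List.find?]
    · have hq : q.1 ≠ p.1 := by
        intro e
        exact (List.nodup_cons.mp h).1 (e ▸ List.mem_map_of_mem hp)
      have hbe : (q.1 == p.1) = false := by simpa using hq
      have := ih (List.nodup_cons.mp h).2 p hp
      simpa [PySem.Dict.getD, PySem.Dict.get?, List.find?, hbe] using this

def pvCell (M : List (List Int)) (i j : Nat) : Int := (M.getD i []).getD j 0

def pvShape (M : List (List Int)) (n : Nat) : Prop :=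
  M.length = n ∧ ∀ k, k < n → (M.getD k []).length = n

lemma pvShape_update (M : List (List Int)) (n i' j' : Nat) (hs : pvShape M n) :
    pvShape (M.modify i' (fun r => r.set j' 1)) n := by
  obtain ⟨h1, h2⟩ := hs
  refine ⟨by simpa using h1, fun k hk => ?_⟩
  have hkM : k < M.length := h1 ▸ hk
  have := h2 k hk
  rw [List.getD_eq_getElem?_getD, List.getElem?_eq_getElem hkM] at this
  simp only [Option.getD_some] at this
  rw [List.getD_eq_getElem?_getD, List.getElem?_modify, List.getElem?_eq_getElem hkM]
  by_cases hik : i' = k <;> simp [hik, this]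

lemma pvCell_update (M : List (List Int)) (n i' j' i j : Nat) (hs : pvShape M n)
    (hi' : i' < n) (hj' : j' < n) :
    pvCell (M.modify i' (fun r => r.set j' 1)) i j = if i' = i ∧ j' = j then 1 else pvCell M i j := by
  obtain ⟨h1, h2⟩ := hs
  unfold pvCell
  simp only [List.getD_eq_getElem?_getD, List.getElem?_modify]
  by_cases hi : i < M.length
  · rw [List.getElem?_eq_getElem hi]
    have hrow : M[i].length = n := by
      have := h2 i (h1 ▸ hi)
      rwa [List.getD_eq_getElem?_getD, List.getElem?_eq_getElem hi] at this
    by_cases hii : i' = i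
    · subst hii
      have hred : ((fun a => if i' = i' then a.set j' 1 else a) <$> some M[i']) = some (M[i'].set j' 1) := by
        simp
      rw [hred, Option.getD_some, List.getElem?_set]
      by_cases hjj : j' = j
      · subst hjj; simp [hrow, hj']
      · simp [hjj]
    · simp [hii]
  · have hnone : M[i]? = none := List.getElem?_eq_none (le_of_not_gt hi)
    have hne : ¬ (i' = i ∧ j' = j) := by rintro ⟨e, _⟩; omega
    simp [hnone, hne]

def pvHit1 (idx : PySem.Dict Int Int) (w : Int) (i : Nat) : Bool :=
  match idx.get? w with
  | some a => a.toNat == i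
  | none => false

lemma pvFillRow_cell (idx : PySem.Dict Int Int) (n : Nat)
    (Hidx : ∀ w a, idx.get? w = some a → a.toNat < n) (v : Int) (ns : List Int) :
    ∀ M, pvShape M n →
      pvShape (pvFillRow idx M v ns) n ∧
      ∀ i j, pvCell (pvFillRow idx M v ns) i j =
        if pvHit1 idx v i ∧ ns.any (fun u => pvHit1 idx u j)
        then 1 else pvCell M i j := by
  induction ns with
  | nil => intro M hM; exact ⟨hM, fun i j => by simp [pvFillRow]⟩
  | cons u ns ih =>
    intro M hM
    have hstep : pvFillRow idx M v (u :: ns) = pvFillRow idx (pvFillCell idx M v u) v ns := rfl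
    have hMs : pvShape (pvFillCell idx M v u) n := by
      unfold pvFillCell
      rcases hgv : idx.get? v with _ | a <;> rcases hgu : idx.get? u with _ | b <;>
        simp only [] <;> first | exact hM | exact pvShape_update M n _ _ hM
    obtain ⟨hsh, hc⟩ := ih (pvFillCell idx M v u) hMs
    refine ⟨hstep ▸ hsh, fun i j => ?_⟩
    rw [hstep, hc i j]
    have hcc : pvCell (pvFillCell idx M v u) i j =
        if pvHit1 idx v i ∧ pvHit1 idx u j then 1 else pvCell M i j := by
      unfold pvFillCell pvHit1
      rcases hgv : idx.get? v with _ | a <;> rcases hgu : idx.get? u with _ | b <;> simp only []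
      · simp
      · simp
      · simp
      · rw [pvCell_update M n a.toNat b.toNat i j hM (Hidx v a hgv) (Hidx u b hgu)]
        simp [beq_iff_eq]
    rw [hcc]
    simp only [List.any_cons, Bool.or_eq_true]
    by_cases h1 : pvHit1 idx v i = true <;>
      by_cases h2 : pvHit1 idx u j = true <;>
      by_cases h3 : ns.any (fun u => pvHit1 idx u j) = true <;>
      simp [h1, h2, h3]

lemma pvFillAll_cell (idx : PySem.Dict Int Int) (n : Nat)
    (Hidx : ∀ w a, idx.get? w = some a → a.toNat < n) (l : List (Int × List Int)) :
    ∀ M, pvShape M n →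
      pvShape (l.foldl (fun A p => pvFillRow idx A p.1 p.2) M) n ∧
      ∀ i j, pvCell (l.foldl (fun A p => pvFillRow idx A p.1 p.2) M) i j =
        if l.any (fun p => pvHit1 idx p.1 i && p.2.any (fun u => pvHit1 idx u j))
        then 1 else pvCell M i j := by
  induction l with
  | nil => intro M hM; exact ⟨hM, fun i j => by simp⟩
  | cons p t ih =>
    intro M hM
    obtain ⟨hshR, hcR⟩ := pvFillRow_cell idx n Hidx p.1 p.2 M hM
    obtain ⟨hsh, hc⟩ := ih (pvFillRow idx M p.1 p.2) hshR
    refine ⟨hsh, fun i j => ?_⟩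
    rw [List.foldl_cons, hc i j, hcR i j]
    simp only [List.any_cons, Bool.and_eq_true, Bool.or_eq_true]
    by_cases h1 : pvHit1 idx p.1 i = true <;>
      by_cases h2 : p.2.any (fun u => pvHit1 idx u j) = true <;>
      by_cases h3 : t.any (fun q => pvHit1 idx q.1 i && q.2.any (fun u => pvHit1 idx u j)) = true <;>
      simp [h1, h2, h3]

lemma pvMain (G : List (Int × List Int)) (hnd : (G.map Prod.fst).Nodup)
    (_hcl : ∀ p ∈ G, ∀ u ∈ p.2, u ∈ G.map Prod.fst) :
    dict_to_matrix G = dict_to_matrix_alt G := by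
  unfold dict_to_matrix dict_to_matrix_alt
  set vs := PySem.List.sorted (G.map Prod.fst) id with hvs
  set n := vs.length with hn
  have hperm : vs.Perm (G.map Prod.fst) := PySem.List.sorted_perm _ _ _
  have hvnd : vs.Nodup := hperm.nodup_iff.mpr hnd
  have hmemv : ∀ w, w ∈ vs ↔ w ∈ G.map Prod.fst := fun w => hperm.mem_iff
  have hidx : ∀ w ∈ vs, (pvIdx vs).get? w = some (vs.idxOf w : Int) := by
    intro w hw
    rw [pvIdx, pvIdx_get vs hvnd ⟨[]⟩ 0 w, if_pos hw, zero_add]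
  have hidxn : ∀ w, w ∉ vs → (pvIdx vs).get? w = none := by
    intro w hw
    rw [pvIdx, pvIdx_get vs hvnd ⟨[]⟩ 0 w, if_neg hw]
    rfl
  have Hidx : ∀ w a, (pvIdx vs).get? w = some a → a.toNat < n := by
    intro w a ha
    by_cases hw : w ∈ vs
    · rw [hidx w hw] at ha
      obtain rfl := (Option.some_injective _ ha).symm
      simpa using List.idxOf_lt_length_iff.mpr hw
    · rw [hidxn w hw] at ha; exact absurd ha (by simp)
  -- pvHit1 characterization
  have hhit : ∀ (w : Int) (k : Nat) (hk : k < vs.length),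
      (pvHit1 (pvIdx vs) w k = true ↔ w ∈ vs ∧ w = vs[k]) := by
    intro w k hk
    unfold pvHit1
    by_cases hw : w ∈ vs
    · rw [hidx w hw]
      simp only [beq_iff_eq, Int.toNat_natCast]
      constructor
      · intro he
        refine ⟨hw, ?_⟩
        have := List.getElem_idxOf (List.idxOf_lt_length_iff.mpr hw) (x := w) (xs := vs)
        subst he
        exact this.symm
      · rintro ⟨_, rfl⟩
        exact hvnd.idxOf_getElem k _
    · rw [hidxn w hw]; simp [hw]
  -- shape and cells of the zero matrix
  have hA0 : pvShape ((List.range n).map (fun _ => List.replicate n (0 : Int))) n := by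
    constructor
    · simp
    · intro k hk
      rw [List.getD_eq_getElem?_getD, List.getElem?_map, List.getElem?_range hk]
      simp
  have hA0cell : ∀ i j, pvCell ((List.range n).map (fun _ => List.replicate n (0 : Int))) i j = 0 := by
    intro i j
    unfold pvCell
    simp only [List.getD_eq_getElem?_getD, List.getElem?_map]
    by_cases hi : i < n
    · rw [List.getElem?_range hi]
      simp only [Option.map_some, Option.getD_some, List.getElem?_replicate]
      by_cases hj : j < n <;> simp [hj]
    · have hnone : (List.range n)[i]? = none := List.getElem?_eq_none (by simpa using not_lt.mp hi)
      rw [hnone]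
      simp
  obtain ⟨hsh, hc⟩ := pvFillAll_cell (pvIdx vs) n Hidx G _ hA0
  -- extensionality
  apply List.ext_getElem
  · rw [hsh.1, List.length_map]
  · intro i hi1 hi2
    have hi : i < n := hsh.1 ▸ hi1
    apply List.ext_getElem
    · have := hsh.2 i hi
      rw [List.getD_eq_getElem?_getD, List.getElem?_eq_getElem hi1, Option.getD_some] at this
      rw [this]
      simp only [pvRowB, PySem.List.pyRange_zero_natCast, List.getElem_map, List.length_map,
        List.length_range]
      exact hn
    · intro j hj1 hj2
      have hrowlen : _ := hsh.2 i hi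
      rw [List.getD_eq_getElem?_getD, List.getElem?_eq_getElem hi1, Option.getD_some] at hrowlen
      have hj : j < n := hrowlen ▸ hj1
      -- LHS = pvCell
      have hL : (G.foldl (fun A p => pvFillRow (pvIdx vs) A p.1 p.2)
            ((List.range n).map (fun _ => List.replicate n (0:Int))))[i][j]'hj1 =
          pvCell (G.foldl (fun A p => pvFillRow (pvIdx vs) A p.1 p.2)
            ((List.range n).map (fun _ => List.replicate n (0:Int)))) i j := by
        unfold pvCell
        simp only [List.getD_eq_getElem?_getD]
        rw [List.getElem?_eq_getElem hi1, Option.getD_some, List.getElem?_eq_getElem hj1,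
            Option.getD_some]
      rw [hL, hc i j, hA0cell i j]
      -- RHS: reduce B's row/cell
      have hjvs : j < vs.length := hn ▸ hj
      have hivs : i < vs.length := hn ▸ hi
      simp only [pvRowB, PySem.List.pyRange_zero_natCast]
      simp only [List.getElem_map, List.getElem_range]
      have hiff : ((G.any fun p => pvHit1 (pvIdx vs) p.1 i && p.2.any fun u => pvHit1 (pvIdx vs) u j) = true)
          ↔ ((j : Nat) : Int) ∈
              PySem.Set.ofList ((PySem.Dict.getD ⟨G⟩ (vs[i]'hivs) []).filterMap
                (fun u => (pvIdx vs).get? u)) := by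
        rw [PySem.Set.mem_ofList, List.mem_filterMap]
        constructor
        · intro hany
          rw [List.any_eq_true] at hany
          obtain ⟨p, hpG, hp⟩ := hany
          rw [Bool.and_eq_true, List.any_eq_true] at hp
          obtain ⟨hp1, u, hu2, hu⟩ := hp
          obtain ⟨_, hpv⟩ := (hhit p.1 i (hn ▸ hi)).mp hp1
          obtain ⟨huvs, huv⟩ := (hhit u j (hn ▸ hj)).mp hu
          have hgd : PySem.Dict.getD ⟨G⟩ (vs[i]'hivs) [] = p.2 := hpv ▸ pvAssoc_getD G hnd p hpG
          refine ⟨u, hgd ▸ hu2, ?_⟩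
          have hio : List.idxOf u vs = j := by rw [huv]; exact hvnd.idxOf_getElem j hjvs
          rw [hidx u huvs, hio]
        · rintro ⟨u, hu2, hus⟩
          have hvi : vs[i]'hivs ∈ G.map Prod.fst := (hmemv _).mp (List.getElem_mem hivs)
          obtain ⟨p, hpG, hpv⟩ := List.mem_map.mp hvi
          have hgd : PySem.Dict.getD ⟨G⟩ (vs[i]'hivs) [] = p.2 := hpv ▸ pvAssoc_getD G hnd p hpG
          rw [hgd] at hu2
          have huvs : u ∈ vs := by
            by_contra hnu
            rw [hidxn u hnu] at hus
            exact absurd hus (by simp)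
          have hio : List.idxOf u vs = j := by
            rw [hidx u huvs] at hus
            exact_mod_cast Option.some_injective _ hus
          have huv : vs[j]'hjvs = u := by
            have hg := List.getElem_idxOf (x := u) (xs := vs) (by rw [hio]; exact hjvs)
            simp only [hio] at hg
            exact hg
          rw [List.any_eq_true]
          refine ⟨p, hpG, ?_⟩
          rw [Bool.and_eq_true, List.any_eq_true]
          exact ⟨(hhit p.1 i (hn ▸ hi)).mpr ⟨hpv ▸ List.getElem_mem hivs, hpv⟩,
            u, hu2, (hhit u j (hn ▸ hj)).mpr ⟨huvs, huv.symm⟩⟩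
      simp only [hiff]

-- ===== VERDICT (by name: the statement is the Claim_ definition above) =====
theorem dict_to_matrix_spec : Claim_equal_dict_to_matrix := by
  intro G _ hpre
  unfold Spec_dict_to_matrix
  exact pvMain G hpre.1 hpre.2
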